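-- pv_equiv track=rewrite | github.com/marcpage/libernet | libernet/tools/hash.py | identifier_match_score
-- ===== SOURCE A (Python) =====
-- def binary_from_identifier(identifier):
--     """get the binary form of an identifier"""
--
--     return bytes.fromhex(("" if len(identifier) % 2 == 0 else "0") + identifier)
--
-- def identifier_to_bits(identifier):
--     """convert identifier to string that represents the binary"""
--     as_bytes = binary_from_identifier(identifier)
--     as_binary = [bin(b).lstrip("0b").zfill(8) for b in as_bytes]
--     return "".join(as_binary)
--
-- def identifier_match_score(id1, id2):
--     """20 bits match takes 10 seconds (21 bits is 3 characters 28 bits is 4)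
--     29,246 hashes/second
--      18 154,630:1 (5,904) 0.1 minutes
--      19 304,007:1 (3,003) 0.2 minutes
--      20 578,906:1 (1,577) 0.3 minutes
--      21 1,046,944:1 (872) 0.6 minutes 3 characters
--      22 1,352,497:1 (675) 0.8 minutes
--      23 5,499,614:1 (166) 3.1 minutes
--      24 6,762,488:1 (135) 3.9 minutes
--      25 14,724,773:1 (62) 8.4 minutes
--      26 26,851,057:1 (34) 15.3 minutes
--      27 30,431,198:1 (30) 17.3 minutes
--      28 152,155,994:1 (6) 1.4 hours     4 characters
--      29 228,233,992:1 (4) 2.2 hours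
--      30 304,311,989:1 (3) 2.9 hours
--      31 456,467,984:1 (2) 4.3 hours
--      33 912,935,968:1 (1) 8.7 hours
--     """
--     bits1 = identifier_to_bits(id1)
--     bits2 = identifier_to_bits(id2)
--     widest = max(len(bits1), len(bits2))
--     padded_bits1 = bits1.zfill(widest)
--     padded_bits2 = bits2.zfill(widest)
--
--     for index, bit1_2 in enumerate(zip(padded_bits1, padded_bits2)):
--         if bit1_2[0] != bit1_2[1]:
--             return index
--
--     return len(padded_bits1)
-- ===== SOURCE B (Python) =====
-- def identifier_match_score(id1, id2):
--     """Number of matching leading bits of the two hex identifiers, each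
--     zero-padded to whole bytes and to a common width: XOR the integer
--     values and subtract the bit length from the width."""
--     widest = 8 * max((len(id1) + 1) // 2, (len(id2) + 1) // 2)
--     x = (int(id1, 16) if id1 else 0) ^ (int(id2, 16) if id2 else 0)
--     return widest - x.bit_length()
-- ===== Notes on version B (the rewrite author's own statement) =====
-- stated objective: faster
-- what changed: A renders both identifiers as '0'/'1' strings byte by byte (bin/lstrip/zfill/join), zero-pads them to a common width and scans the zipped strings character by character for the first mismatch; B never builds any string: it XORs the two integer values int(id,16) and returns width minus the XOR's bit_length.
-- outside the precondition, e.g. on identifier_match_score('ab  cd', 'ab  cd'): A returns 16, B raises ValueError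
import Mathlib
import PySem

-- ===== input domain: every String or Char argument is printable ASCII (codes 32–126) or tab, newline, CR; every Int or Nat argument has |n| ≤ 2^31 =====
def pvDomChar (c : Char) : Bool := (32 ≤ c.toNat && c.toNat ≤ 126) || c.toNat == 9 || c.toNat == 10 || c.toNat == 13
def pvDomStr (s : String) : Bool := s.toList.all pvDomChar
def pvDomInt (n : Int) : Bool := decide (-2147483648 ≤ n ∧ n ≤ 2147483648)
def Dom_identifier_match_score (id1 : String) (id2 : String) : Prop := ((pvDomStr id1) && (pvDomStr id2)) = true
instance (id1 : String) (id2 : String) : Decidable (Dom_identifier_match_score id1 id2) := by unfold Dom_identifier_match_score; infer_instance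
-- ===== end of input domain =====

-- B replaces A's per-bit string building and scan by integer XOR and bit_length
-- (objective: faster, constant-factor). Pre_ restricts to hex-digit-only identifiers:
-- bytes.fromhex raises ValueError on anything else except some whitespace-bearing
-- strings whose acceptance is accidental (see the cites in the claim).

-- value of one hex digit, as both bytes.fromhex and int(s, 16) read it;
-- on non-hex characters (excluded by Pre_, where the Python raises) it returns 0
def pvHexDigit (c : Char) : Nat :=
  if '0' ≤ c ∧ c ≤ '9' then c.toNat - 48
  else if 'a' ≤ c ∧ c ≤ 'f' then c.toNat - 87
  else if 'A' ≤ c ∧ c ≤ 'F' then c.toNat - 55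
  else 0

-- ===== PORT A =====

-- bytes.fromhex: consecutive pairs of hex digits become byte values (Pre_ gives an
-- even-length all-hex string here, exactly where fromhex returns)
def pvFromHex : List Char → List Nat
  | c1 :: c2 :: rest => (16 * pvHexDigit c1 + pvHexDigit c2) :: pvFromHex rest
  | _ => []

-- identifier_to_bits: bytes of the (possibly '0'-prefixed) identifier, each rendered
-- as bin(b).lstrip("0b").zfill(8); bin is PySem.Int.toBinChars0b and
-- lstrip("0b") = drop leading '0'/'b' chars
def pvToBitsA (s : List Char) : List Char :=
  ((pvFromHex (if s.length % 2 = 0 then s else '0' :: s)).map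
    (fun b : Nat => PySem.Chars.zfill
      ((PySem.Int.toBinChars0b (b : Int)).dropWhile (fun c => c = '0' ∨ c = 'b')) 8)).flatten

-- the for-loop over enumerate(zip(...)): first index where the chars differ
def pvScan : Nat → List (Char × Char) → Option Nat
  | _, [] => none
  | i, (a, b) :: rest => if a ≠ b then some i else pvScan (i + 1) rest

def identifier_match_score (id1 : String) (id2 : String) : Int :=
  let bits1 := pvToBitsA id1.toList
  let bits2 := pvToBitsA id2.toList
  let widest := max bits1.length bits2.length
  let padded1 := PySem.Chars.zfill bits1 widest
  let padded2 := PySem.Chars.zfill bits2 widest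
  match pvScan 0 (padded1.zip padded2) with
  | some i => (i : Int)
  | none => (padded1.length : Int)

-- ===== PORT B =====

-- int(s, 16), exact on the hex-digit strings Pre_ admits (int raises elsewhere)
def altHexNat (s : List Char) : Nat := s.foldl (fun a c => 16 * a + pvHexDigit c) 0

def identifier_match_score_alt (id1 : String) (id2 : String) : Int :=
  let widest : Nat := 8 * max ((id1.toList.length + 1) / 2) ((id2.toList.length + 1) / 2)
  let v1 : Int := if id1.toList ≠ [] then (altHexNat id1.toList : Int) else 0
  let v2 : Int := if id2.toList ≠ [] then (altHexNat id2.toList : Int) else 0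
  (widest : Int) - (PySem.Int.bitLength (PySem.Int.bxor v1 v2) : Int)

-- ===== PRECONDITION & SPEC =====

def pvIsHex (c : Char) : Bool :=
  ('0' ≤ c && c ≤ '9') || ('a' ≤ c && c ≤ 'f') || ('A' ≤ c && c ≤ 'F')

-- Pre_ admits exactly the hex-digit-only identifiers (possibly empty). Outside it the
-- Python A raises ValueError, except that bytes.fromhex also tolerates ASCII whitespace
-- between bytes, so A happens to return on a few whitespace-bearing strings (e.g.
-- "ab  cd"); that acceptance is accidental for a hex identifier and B raises there.
def Pre_identifier_match_score (id1 : String) (id2 : String) : Prop :=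
  id1.toList.all pvIsHex = true ∧ id2.toList.all pvIsHex = true
instance (id1 : String) (id2 : String) : Decidable (Pre_identifier_match_score id1 id2) := by
  unfold Pre_identifier_match_score; infer_instance

def pvWitness_identifier_match_score : String × String := ("1a2B", "1a3f")

def Spec_identifier_match_score (id1 : String) (id2 : String) (out : Int) : Prop :=
  out = identifier_match_score_alt id1 id2
instance (id1 : String) (id2 : String) (out : Int) :
    Decidable (Spec_identifier_match_score id1 id2 out) := by
  unfold Spec_identifier_match_score; infer_instance

-- ===== CLAIM (what is proved, stated in full; the proofs are below) =====
def Claim_equal_identifier_match_score : Prop :=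
  ∀ (id1 : String) (id2 : String), Dom_identifier_match_score id1 id2 →
    Pre_identifier_match_score id1 id2 →
    Spec_identifier_match_score id1 id2 (identifier_match_score id1 id2)

-- ===== LEMMAS AND PROOFS =====

-- reference form: the low w binary digits of n, most significant first
def toBits : Nat → Nat → List Char
  | _, 0 => []
  | n, w + 1 => toBits (n / 2) w ++ [if n % 2 = 1 then '1' else '0']

theorem toBits_length (n w : Nat) : (toBits n w).length = w := by
  induction w generalizing n with
  | zero => rfl
  | succ w ih => simp [toBits, ih]

theorem toBits_zero (w : Nat) : toBits 0 w = List.replicate w '0' := by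
  induction w with
  | zero => rfl
  | succ w ih => simp [toBits, ih, List.replicate_succ']

theorem toBits_mul_add (a b k w : Nat) (hb : b < 2 ^ k) :
    toBits (2 ^ k * a + b) (w + k) = toBits a w ++ toBits b k := by
  induction k generalizing b with
  | zero =>
    interval_cases b
    simp [toBits]
  | succ k ih =>
    have h1 : (2 ^ (k + 1) * a + b) / 2 = 2 ^ k * a + b / 2 := by
      rw [pow_succ, mul_comm (2 ^ k) 2, mul_assoc, Nat.mul_add_div (by omega)]
    have h2 : (2 ^ (k + 1) * a + b) % 2 = b % 2 := by
      rw [pow_succ, mul_comm (2 ^ k) 2, mul_assoc, Nat.mul_add_mod]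
    have hb2 : b / 2 < 2 ^ k := by
      have := Nat.pow_pos (n := k) (by omega : 0 < 2)
      omega
    show toBits (2 ^ (k + 1) * a + b) ((w + k) + 1) = _
    rw [toBits, h1, h2, ih _ hb2, toBits, List.append_assoc]

theorem toBits_cons (n W : Nat) (h : n < 2 ^ (W + 1)) :
    toBits n (W + 1) =
      (if n / 2 ^ W = 1 then '1' else '0') :: toBits (n % 2 ^ W) W := by
  induction W generalizing n with
  | zero => interval_cases n <;> decide
  | succ W ih =>
    have hd : n / 2 < 2 ^ (W + 1) := by
      have := Nat.pow_pos (n := W + 1) (by omega : 0 < 2)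
      rw [pow_succ] at h; omega
    have e1 : n / 2 / 2 ^ W = n / 2 ^ (W + 1) := by
      rw [Nat.div_div_eq_div_mul, ← pow_succ']
    have e2 : n / 2 % 2 ^ W = n % 2 ^ (W + 1) / 2 := by
      rw [pow_succ', Nat.mod_mul_right_div_self]
    have e3 : n % 2 ^ (W + 1) % 2 = n % 2 := by
      exact Nat.mod_mod_of_dvd n (dvd_pow_self 2 (by omega))
    show toBits n ((W + 1) + 1) = _
    rw [toBits, ih _ hd, e1, e2]
    rw [show toBits (n % 2 ^ (W + 1)) (W + 1) =
        toBits (n % 2 ^ (W + 1) / 2) W ++ [if n % 2 ^ (W + 1) % 2 = 1 then '1' else '0'] from rfl]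
    rw [e3]
    simp

-- ---- A-side pipeline equals toBits of the hex value ----

theorem pvHexDigit_lt (c : Char) : pvHexDigit c < 16 := by
  unfold pvHexDigit
  split_ifs with h1 h2 h3 <;> try omega
  all_goals
    first
    | (obtain ⟨ha, hb⟩ := h1) | (obtain ⟨ha, hb⟩ := h2) | (obtain ⟨ha, hb⟩ := h3)
  all_goals
    simp only [Char.le_def, UInt32.le_iff_toNat_le] at ha hb
  all_goals
    simp only [Char.toNat] at *
  · have e1 : ('0' : Char).val.toNat = 48 := by decide
    have e2 : ('9' : Char).val.toNat = 57 := by decide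
    omega
  · have e1 : ('a' : Char).val.toNat = 97 := by decide
    have e2 : ('f' : Char).val.toNat = 102 := by decide
    omega
  · have e1 : ('A' : Char).val.toNat = 65 := by decide
    have e2 : ('F' : Char).val.toNat = 70 := by decide
    omega

theorem pvFromHex_lt (s : List Char) : ∀ b ∈ pvFromHex s, b < 256 := by
  induction s using pvFromHex.induct with
  | case1 c1 c2 rest ih =>
    intro b hb
    simp only [pvFromHex, List.mem_cons] at hb
    rcases hb with h | h
    · have := pvHexDigit_lt c1; have := pvHexDigit_lt c2; omega
    · exact ih b h
  | case2 s h =>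
    intro b hb
    rcases s with _ | ⟨c, _ | ⟨d, t⟩⟩
    · simp [pvFromHex] at hb
    · simp [pvFromHex] at hb
    · exact absurd rfl (h c d t ·)

-- one byte: bin(b).lstrip("0b").zfill(8) = toBits b 8, checked over all 256 bytes
set_option maxRecDepth 8192 in
theorem pvByteBits (b : Nat) (hb : b < 256) :
    PySem.Chars.zfill
      ((PySem.Int.toBinChars0b (b : Int)).dropWhile (fun c => c = '0' ∨ c = 'b')) 8 = toBits b 8 := by
  have h : (List.range 256).all
      (fun b : Nat => PySem.Chars.zfill
        ((PySem.Int.toBinChars0b (b : Int)).dropWhile (fun c => c = '0' ∨ c = 'b')) 8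
          == toBits b 8) = true := by decide
  rw [List.all_eq_true] at h
  exact eq_of_beq (h b (List.mem_range.mpr hb))

theorem pvFlatten (bytes : List Nat) (hb : ∀ b ∈ bytes, b < 256) (a w : Nat) :
    toBits a w ++ (bytes.map (fun b => toBits b 8)).flatten =
      toBits (bytes.foldl (fun x b => 256 * x + b) a) (w + 8 * bytes.length) := by
  induction bytes generalizing a w with
  | nil => simp [toBits]
  | cons b rest ih =>
    have h1 : toBits a w ++ toBits b 8 = toBits (256 * a + b) (w + 8) := by
      have hb8 : b < 2 ^ 8 := by norm_num; exact hb b (by simp)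
      rw [show (256 : Nat) = 2 ^ 8 from rfl, toBits_mul_add a b 8 w hb8]
    simp only [List.map_cons, List.flatten_cons, ← List.append_assoc, h1,
      List.foldl_cons]
    rw [ih (fun x hx => hb x (by simp [hx])) (256 * a + b) (w + 8)]
    congr 1
    simp [List.length_cons]; ring

theorem pvPairsVal (s : List Char) (h : s.length % 2 = 0) (a : Nat) :
    (pvFromHex s).foldl (fun x b => 256 * x + b) a =
      s.foldl (fun x c => 16 * x + pvHexDigit c) a := by
  induction s using pvFromHex.induct generalizing a with
  | case1 c1 c2 rest ih =>
    simp only [pvFromHex, List.foldl_cons]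
    rw [ih (by simp at h ⊢; omega)]
    ring_nf
  | case2 s hs =>
    rcases s with _ | ⟨c, _ | ⟨d, t⟩⟩
    · simp [pvFromHex]
    · simp at h
    · exact absurd rfl (hs c d t ·)

theorem altHexNat_cons_zero (s : List Char) : altHexNat ('0' :: s) = altHexNat s := by
  simp [altHexNat, pvHexDigit]

theorem hexFold_lt (s : List Char) : ∀ a : Nat,
    s.foldl (fun x c => 16 * x + pvHexDigit c) a < (a + 1) * 16 ^ s.length := by
  induction s with
  | nil => intro a; simp
  | cons c rest ih =>
    intro a
    have h1 := ih (16 * a + pvHexDigit c)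
    have h2 := pvHexDigit_lt c
    have h3 : (16 * a + pvHexDigit c + 1) * 16 ^ rest.length ≤ (a + 1) * 16 ^ (rest.length + 1) := by
      rw [pow_succ]
      have : 16 * a + pvHexDigit c + 1 ≤ (a + 1) * 16 := by omega
      calc (16 * a + pvHexDigit c + 1) * 16 ^ rest.length
          ≤ (a + 1) * 16 * 16 ^ rest.length := Nat.mul_le_mul_right _ this
        _ = (a + 1) * (16 ^ rest.length * 16) := by ring
    simp only [List.foldl_cons, List.length_cons]
    omega

theorem altHexNat_lt (s : List Char) : altHexNat s < 2 ^ (4 * s.length) := by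
  have h := hexFold_lt s 0
  have h16 : (16 : Nat) ^ s.length = 2 ^ (4 * s.length) := by
    rw [show (16 : Nat) = 2 ^ 4 from rfl, ← pow_mul]
  unfold altHexNat
  omega

-- A's identifier_to_bits equals the binary rendering of int(s,16) at byte width
theorem pvToBitsA_eq (s : List Char) :
    pvToBitsA s = toBits (altHexNat s) (8 * ((s.length + 1) / 2)) := by
  unfold pvToBitsA
  set padded := if s.length % 2 = 0 then s else '0' :: s with hp
  have hlen : padded.length % 2 = 0 := by
    by_cases h : s.length % 2 = 0 <;> first | (simp [hp, h]; omega) | simp [hp, h]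
  have hval : altHexNat padded = altHexNat s := by
    by_cases h : s.length % 2 = 0 <;> simp [hp, h, altHexNat_cons_zero]
  have hw : 8 * (padded.length / 2) = 8 * ((s.length + 1) / 2) := by
    by_cases h : s.length % 2 = 0 <;> first | (simp [hp, h]; omega) | simp [hp, h]
  have hmap : (pvFromHex padded).map
      (fun b : Nat => PySem.Chars.zfill
        ((PySem.Int.toBinChars0b (b : Int)).dropWhile (fun c => c = '0' ∨ c = 'b')) 8) =
      (pvFromHex padded).map (fun b => toBits b 8) := by
    apply List.map_congr_left
    intro b hb
    exact pvByteBits b (pvFromHex_lt padded b hb)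
  rw [hmap]
  have hflat := pvFlatten (pvFromHex padded) (pvFromHex_lt padded) 0 0
  rw [show toBits 0 0 = [] from rfl, List.nil_append, Nat.zero_add] at hflat
  rw [hflat, pvPairsVal padded hlen 0]
  have hvfold : List.foldl (fun x c => 16 * x + pvHexDigit c) 0 padded = altHexNat s := by
    simpa [altHexNat] using hval
  have hfl : (pvFromHex padded).length = padded.length / 2 := by
    clear hval hflat hlen
    induction padded using pvFromHex.induct with
    | case1 c1 c2 rest ih => simp [pvFromHex, ih]; omega
    | case2 t ht =>
      rcases t with _ | ⟨c, _ | ⟨d, u⟩⟩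
      · simp [pvFromHex]
      · simp [pvFromHex]
      · exact absurd rfl (ht c d u ·)
  rw [hfl, hw, hvfold]

-- every character of toBits is '0' or '1'
theorem toBits_chars (n w : Nat) : ∀ x ∈ toBits n w, x = '0' ∨ x = '1' := by
  induction w generalizing n with
  | zero => simp [toBits]
  | succ w ih =>
    intro x hx
    rw [toBits] at hx
    rcases List.mem_append.mp hx with h | h
    · exact ih _ x h
    · simp at h; split at h <;> simp_all

-- zero-filling toBits only raises its width
theorem zfill_toBits (v w W : Nat) (hv : v < 2 ^ w) (hw : w ≤ W) :
    PySem.Chars.zfill (toBits v w) (W : Int) = toBits v W := by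
  have hlen := toBits_length v w
  have hsplit : toBits v W = List.replicate (W - w) '0' ++ toBits v w := by
    have := toBits_mul_add 0 v w (W - w) hv
    simpa [toBits_zero, Nat.sub_add_cancel hw] using this
  rcases Nat.eq_or_lt_of_le hw with hEq | hlt
  · subst hEq
    rw [PySem.Chars.zfill.eq_def, if_pos (by simp [hlen])]
  · rw [PySem.Chars.zfill.eq_def, if_neg (by simp [hlen]; omega)]
    cases hcase : toBits v w with
    | nil =>
      have hw0 : w = 0 := by rw [hcase] at hlen; simpa using hlen.symm
      have hv0 : v = 0 := by subst hw0; simpa using hv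
      subst hv0
      simp [toBits_zero]
    | cons c rest =>
      have hc : ¬ (c = '+' ∨ c = '-') := by
        have := toBits_chars v w c (by rw [hcase]; exact List.mem_cons_self ..)
        rcases this with h | h <;> simp [h]
      simp only []
      rw [if_neg hc, ← hcase, hsplit, hlen]
      congr 2

-- characters of toBits as bits of the value
theorem pvScan_toBits (W : Nat) : ∀ v1 v2 : Nat, v1 < 2 ^ W → v2 < 2 ^ W → ∀ i : Nat,
    pvScan i ((toBits v1 W).zip (toBits v2 W)) =
      if v1 = v2 then none
      else some (i + (W - PySem.Int.bitLength ((v1 ^^^ v2 : Nat) : Int))) := by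
  induction W with
  | zero =>
    intro v1 v2 h1 h2 i
    interval_cases v1
    interval_cases v2
    simp [toBits, pvScan]
  | succ W ih =>
    intro v1 v2 h1 h2 i
    have ht1 : v1 / 2 ^ W < 2 := by
      have := Nat.pow_pos (n := W) (by omega : 0 < 2)
      rw [pow_succ] at h1
      exact Nat.div_lt_of_lt_mul (by omega)
    have ht2 : v2 / 2 ^ W < 2 := by
      have := Nat.pow_pos (n := W) (by omega : 0 < 2)
      rw [pow_succ] at h2
      exact Nat.div_lt_of_lt_mul (by omega)
    rw [toBits_cons v1 W h1, toBits_cons v2 W h2]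
    simp only [List.zip_cons_cons, pvScan]
    have hm1 : v1 % 2 ^ W < 2 ^ W := Nat.mod_lt _ (Nat.pow_pos (by omega))
    have hm2 : v2 % 2 ^ W < 2 ^ W := Nat.mod_lt _ (Nat.pow_pos (by omega))
    by_cases htop : v1 / 2 ^ W = v2 / 2 ^ W
    · -- equal top bit: heads equal, recurse on the low parts
      rw [htop]
      rw [if_neg (by simp)]
      rw [ih (v1 % 2 ^ W) (v2 % 2 ^ W) hm1 hm2 (i + 1)]
      have hxor : v1 ^^^ v2 = (v1 % 2 ^ W) ^^^ (v2 % 2 ^ W) := by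
        apply Nat.eq_of_testBit_eq
        intro j
        rw [Nat.testBit_xor, Nat.testBit_xor, Nat.testBit_mod_two_pow,
          Nat.testBit_mod_two_pow]
        by_cases hj : j < W
        · simp [hj]
        · have hb1 : v1.testBit j = v2.testBit j := by
            have e1 : v1.testBit j = (v1 >>> W).testBit (j - W) := by
              rw [Nat.testBit_shiftRight]; congr 1; omega
            have e2 : v2.testBit j = (v2 >>> W).testBit (j - W) := by
              rw [Nat.testBit_shiftRight]; congr 1; omega
            rw [e1, e2, Nat.shiftRight_eq_div_pow, Nat.shiftRight_eq_div_pow, htop]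
          simp [hj, hb1]
      rw [hxor]
      have hveq : v1 = v2 ↔ v1 % 2 ^ W = v2 % 2 ^ W := by
        constructor
        · intro h; rw [h]
        · intro h
          have d1 := Nat.div_add_mod v1 (2 ^ W)
          have d2 := Nat.div_add_mod v2 (2 ^ W)
          rw [htop, h] at d1
          omega
      by_cases hlow : v1 % 2 ^ W = v2 % 2 ^ W
      · rw [if_pos hlow, if_pos (hveq.mpr hlow)]
      · rw [if_neg hlow, if_neg (fun h => hlow (hveq.mp h))]
        have hxlt : (v1 % 2 ^ W) ^^^ (v2 % 2 ^ W) < 2 ^ W := Nat.xor_lt_two_pow hm1 hm2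
        have hL : PySem.Int.bitLength (((v1 % 2 ^ W) ^^^ (v2 % 2 ^ W) : Nat) : Int) ≤ W := by
          set x := (v1 % 2 ^ W) ^^^ (v2 % 2 ^ W) with hx
          by_cases hx0 : x = 0
          · rw [hx0]; simp [PySem.Int.bitLength_zero]
          · have hub := PySem.Int.lt_two_pow_bitLength ((x : Nat) : Int)
            have hlb := PySem.Int.two_pow_bitLength_le ((x : Nat) : Int)
              (by exact_mod_cast hx0)
            simp only [Int.natAbs_natCast] at hub hlb
            by_contra hcon
            have : 2 ^ W ≤ 2 ^ (PySem.Int.bitLength ((x : Nat) : Int) - 1) :=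
              Nat.pow_le_pow_right (by omega) (by omega)
            omega
        congr 1
        omega
    · -- different top bit: heads differ, mismatch here and bitLength = W + 1
      have hne : (if v1 / 2 ^ W = 1 then '1' else '0') ≠ (if v2 / 2 ^ W = 1 then '1' else '0') := by
        interval_cases h1' : v1 / 2 ^ W <;> interval_cases h2' : v2 / 2 ^ W <;> simp_all
      rw [if_pos hne]
      have hvne : v1 ≠ v2 := fun h => htop (by rw [h])
      rw [if_neg hvne]
      set x := v1 ^^^ v2 with hx
      have hxlt : x < 2 ^ (W + 1) := Nat.xor_lt_two_pow h1 h2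
      have hbit : x.testBit W = true := by
        rw [hx, Nat.testBit_xor]
        rw [Nat.testBit_eq_decide_div_mod_eq, Nat.testBit_eq_decide_div_mod_eq]
        interval_cases hh1 : v1 / 2 ^ W <;> interval_cases hh2 : v2 / 2 ^ W <;> simp_all
      have hge : 2 ^ W ≤ x := Nat.ge_two_pow_of_testBit hbit
      have hL : PySem.Int.bitLength ((x : Nat) : Int) = W + 1 := by
        have hx0 : x ≠ 0 := by
          have := Nat.pow_pos (n := W) (by omega : 0 < 2); omega
        have hub := PySem.Int.lt_two_pow_bitLength ((x : Nat) : Int)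
        have hlb := PySem.Int.two_pow_bitLength_le ((x : Nat) : Int) (by exact_mod_cast hx0)
        simp only [Int.natAbs_natCast] at hub hlb
        set L := PySem.Int.bitLength ((x : Nat) : Int) with hLdef
        by_contra hcon
        rcases Nat.lt_or_ge L (W + 1) with hlt | hgt
        · have : 2 ^ L ≤ 2 ^ W := Nat.pow_le_pow_right (by omega) (by omega)
          omega
        · have hgt' : W + 2 ≤ L := by omega
          have : 2 ^ (W + 1) ≤ 2 ^ (L - 1) := Nat.pow_le_pow_right (by omega) (by omega)
          omega
      rw [hL]
      simp

-- ===== VERDICT (by name: the statement is the Claim_ definition above) =====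
theorem identifier_match_score_spec : Claim_equal_identifier_match_score := by
  intro id1 id2 _hdom _hpre
  unfold Spec_identifier_match_score identifier_match_score identifier_match_score_alt
  set s1 := id1.toList with hs1
  set s2 := id2.toList with hs2
  set w1 := 8 * ((s1.length + 1) / 2) with hw1
  set w2 := 8 * ((s2.length + 1) / 2) with hw2
  set v1 := altHexNat s1 with hv1
  set v2 := altHexNat s2 with hv2
  have hlen1 : (pvToBitsA s1).length = w1 := by rw [pvToBitsA_eq, toBits_length]
  have hlen2 : (pvToBitsA s2).length = w2 := by rw [pvToBitsA_eq, toBits_length]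
  set W := max w1 w2 with hW
  have hb1 : v1 < 2 ^ w1 := by
    have h4 := altHexNat_lt s1
    have : 4 * s1.length ≤ w1 := by omega
    exact lt_of_lt_of_le h4 (Nat.pow_le_pow_right (by omega) this)
  have hb2 : v2 < 2 ^ w2 := by
    have h4 := altHexNat_lt s2
    have : 4 * s2.length ≤ w2 := by omega
    exact lt_of_lt_of_le h4 (Nat.pow_le_pow_right (by omega) this)
  have hB1 : v1 < 2 ^ W := lt_of_lt_of_le hb1 (Nat.pow_le_pow_right (by omega) (by omega))
  have hB2 : v2 < 2 ^ W := lt_of_lt_of_le hb2 (Nat.pow_le_pow_right (by omega) (by omega))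
  have hz1 : PySem.Chars.zfill (pvToBitsA s1) (W : Int) = toBits v1 W := by
    rw [pvToBitsA_eq, ← hw1, ← hv1, zfill_toBits v1 w1 W hb1 (by omega)]
  have hz2 : PySem.Chars.zfill (pvToBitsA s2) (W : Int) = toBits v2 W := by
    rw [pvToBitsA_eq, ← hw2, ← hv2, zfill_toBits v2 w2 W hb2 (by omega)]
  simp only [hlen1, hlen2, ← hW, hz1, hz2]
  -- B's value: the xor of the two (possibly-guarded) hex values
  have hvv1 : (if s1 ≠ [] then ((altHexNat s1 : Nat) : Int) else 0) = ((v1 : Nat) : Int) := by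
    by_cases h : s1 = [] <;> simp [h, hv1, altHexNat]
  have hvv2 : (if s2 ≠ [] then ((altHexNat s2 : Nat) : Int) else 0) = ((v2 : Nat) : Int) := by
    by_cases h : s2 = [] <;> simp [h, hv2, altHexNat]
  rw [hvv1, hvv2, PySem.Int.bxor_natCast]
  rw [pvScan_toBits W v1 v2 hB1 hB2 0]
  have hwidest : (8 : Nat) * max ((s1.length + 1) / 2) ((s2.length + 1) / 2) = W := by
    rw [hW, hw1, hw2]; omega
  have hcast : ((8 * max ((s1.length + 1) / 2) ((s2.length + 1) / 2) : Nat) : Int) = (W : Int) := by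
    rw [hwidest]
  rw [hcast]
  by_cases hveq : v1 = v2
  · rw [if_pos hveq, hveq, Nat.xor_self]
    simp [PySem.Int.bitLength_zero, toBits_length]
  · rw [if_neg hveq]
    have hxlt : v1 ^^^ v2 < 2 ^ W := Nat.xor_lt_two_pow hB1 hB2
    have hL : PySem.Int.bitLength (((v1 ^^^ v2 : Nat)) : Int) ≤ W := by
      set x := v1 ^^^ v2 with hx
      have hx0 : x ≠ 0 := fun h => hveq (Nat.xor_eq_zero_iff.mp h)
      have hub := PySem.Int.lt_two_pow_bitLength ((x : Nat) : Int)
      have hlb := PySem.Int.two_pow_bitLength_le ((x : Nat) : Int) (by exact_mod_cast hx0)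
      simp only [Int.natAbs_natCast] at hub hlb
      by_contra hcon
      have : 2 ^ W ≤ 2 ^ (PySem.Int.bitLength ((x : Nat) : Int) - 1) :=
        Nat.pow_le_pow_right (by omega) (by omega)
      omega
    simp only [Nat.zero_add]
    omega
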